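-- pv_equiv track=rewrite | github.com/ssantichaivekin/hmc-reconciliation-graph | script03_test_correctness_orig.py | recon_trees_diff
-- ===== SOURCE A (Python) =====
-- def recon_trees_diff(recon_tree_A, recon_tree_B):
--     '''
--     Return the symmetric set difference between
--     the two trees.
--     '''
--     diff_count = 0
--     for mapping_node_key in recon_tree_A:
--         if mapping_node_key not in recon_tree_B :
--             diff_count += 1
--         elif recon_tree_A[mapping_node_key] != recon_tree_B[mapping_node_key] :
--             diff_count += 1
--
--     for mapping_node_key in recon_tree_B:
--         if mapping_node_key not in recon_tree_A :
--             diff_count += 1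
--         elif recon_tree_A[mapping_node_key] != recon_tree_B[mapping_node_key] :
--             diff_count += 1
--
--     return diff_count
-- ===== SOURCE B (Python) =====
-- def recon_trees_diff(recon_tree_A, recon_tree_B):
--     '''
--     Return the symmetric set difference between
--     the two trees.
--     '''
--     diff_count = 0
--     for mapping_node_key in recon_tree_A.keys() | recon_tree_B.keys():
--         if mapping_node_key in recon_tree_A and mapping_node_key in recon_tree_B:
--             diff_count += 2 if recon_tree_A[mapping_node_key] != recon_tree_B[mapping_node_key] else 0
--         else:
--             diff_count += 1
--     return diff_count
-- ===== Notes on version B (the rewrite author's own statement) =====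
-- stated objective: simpler
-- what changed: Replaces A's two full passes (one over each dict, re-testing membership and re-comparing values in both) by a single pass over the union of the key sets, adding 2 for a shared key with differing values, 1 for a key present in only one dict, 0 otherwise.
import Mathlib
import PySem

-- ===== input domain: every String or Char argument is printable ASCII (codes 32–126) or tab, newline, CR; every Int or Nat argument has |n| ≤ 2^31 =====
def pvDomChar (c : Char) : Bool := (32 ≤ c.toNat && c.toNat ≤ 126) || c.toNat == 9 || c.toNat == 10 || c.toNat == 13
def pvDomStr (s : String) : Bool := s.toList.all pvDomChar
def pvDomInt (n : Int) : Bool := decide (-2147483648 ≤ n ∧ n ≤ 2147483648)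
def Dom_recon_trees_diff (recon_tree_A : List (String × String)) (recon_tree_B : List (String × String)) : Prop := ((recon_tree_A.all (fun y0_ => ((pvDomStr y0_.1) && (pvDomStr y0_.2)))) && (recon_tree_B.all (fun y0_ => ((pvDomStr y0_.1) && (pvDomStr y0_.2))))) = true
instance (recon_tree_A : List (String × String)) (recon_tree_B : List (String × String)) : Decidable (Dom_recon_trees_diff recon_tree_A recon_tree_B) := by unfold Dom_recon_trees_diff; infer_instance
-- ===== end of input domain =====

-- B replaces A's two passes over the dicts by a single pass over the union of their key sets (same result, one traversal).


-- ===== PORT A =====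
-- literal port of A: iterate A's keys, then B's keys, adding 1 for a missing or differing key each time
def recon_trees_diff (recon_tree_A : List (String × String)) (recon_tree_B : List (String × String)) : Int :=
  let dA : PySem.Dict String String := PySem.Dict.mk recon_tree_A
  let dB : PySem.Dict String String := PySem.Dict.mk recon_tree_B
  let c1 : Int := dA.keys.foldl (fun acc k =>
      if dB.contains k = false then acc + 1
      else if dA.get? k ≠ dB.get? k then acc + 1 else acc) 0
  dB.keys.foldl (fun acc k =>
      if dA.contains k = false then acc + 1
      else if dA.get? k ≠ dB.get? k then acc + 1 else acc) c1

-- ===== PORT B =====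
-- port of B: one pass over the union of the key sets
def recon_trees_diff_alt (recon_tree_A : List (String × String)) (recon_tree_B : List (String × String)) : Int :=
  let dA : PySem.Dict String String := PySem.Dict.mk recon_tree_A
  let dB : PySem.Dict String String := PySem.Dict.mk recon_tree_B
  (PySem.Set.ofList (dA.keys ++ dB.keys)).foldl (fun acc k =>
      if dA.contains k && dB.contains k then
        acc + (if dA.get? k ≠ dB.get? k then 2 else 0)
      else acc + 1) 0

-- ===== PRECONDITION & SPEC =====
-- Pre_ excludes association lists with a duplicated key: those do not represent a Python dict
-- (the dict the Python functions receive collapses duplicates), so nothing is claimed about them.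
def Pre_recon_trees_diff (recon_tree_A : List (String × String)) (recon_tree_B : List (String × String)) : Prop :=
  (recon_tree_A.map Prod.fst).Nodup ∧ (recon_tree_B.map Prod.fst).Nodup
instance (recon_tree_A : List (String × String)) (recon_tree_B : List (String × String)) : Decidable (Pre_recon_trees_diff recon_tree_A recon_tree_B) := by unfold Pre_recon_trees_diff; infer_instance
def pvWitness_recon_trees_diff : (List (String × String)) × (List (String × String)) :=
  ([("a", "x"), ("c", "z")], [("a", "y"), ("b", "z")])

def Spec_recon_trees_diff (recon_tree_A : List (String × String)) (recon_tree_B : List (String × String)) (out : Int) : Prop := out = recon_trees_diff_alt recon_tree_A recon_tree_B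
instance (recon_tree_A : List (String × String)) (recon_tree_B : List (String × String)) (out : Int) : Decidable (Spec_recon_trees_diff recon_tree_A recon_tree_B out) := by unfold Spec_recon_trees_diff; infer_instance

-- ===== CLAIM (what is proved, stated in full; the proofs are below) =====
def Claim_equal_recon_trees_diff : Prop := ∀ (recon_tree_A : List (String × String)) (recon_tree_B : List (String × String)), Dom_recon_trees_diff recon_tree_A recon_tree_B → Pre_recon_trees_diff recon_tree_A recon_tree_B → Spec_recon_trees_diff recon_tree_A recon_tree_B (recon_trees_diff recon_tree_A recon_tree_B)

-- ===== LEMMAS AND PROOFS =====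

-- summing f over a nodup list l equals summing the l-indicator of f over any nodup superset u
lemma sum_map_indicator_superset (l u : List String) (f : String → Int)
    (hl : l.Nodup) (hu : u.Nodup) (hsub : ∀ x ∈ l, x ∈ u) :
    (l.map f).sum = (u.map (fun k => if k ∈ l then f k else 0)).sum := by
  rw [← List.sum_toFinset f hl, ← List.sum_toFinset _ hu]
  rw [← Finset.sum_filter (fun k => k ∈ l) f]
  apply Finset.sum_congr
  · ext x
    simp only [Finset.mem_filter, List.mem_toFinset]
    exact ⟨fun h => ⟨hsub x h, h⟩, fun h => h.2⟩
  · intro _ _; rfl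

-- ===== VERDICT (by name: the statement is the Claim_ definition above) =====
theorem recon_trees_diff_spec : Claim_equal_recon_trees_diff := by
  intro A B _hdom hpre
  unfold Spec_recon_trees_diff recon_trees_diff recon_trees_diff_alt
  dsimp only []
  obtain ⟨hA, hB⟩ := hpre
  set dA : PySem.Dict String String := PySem.Dict.mk A with hdA
  set dB : PySem.Dict String String := PySem.Dict.mk B with hdB
  have hkA : dA.keys = A.map Prod.fst := by simp [hdA, PySem.Dict.keys_mk]
  have hkB : dB.keys = B.map Prod.fst := by simp [hdB, PySem.Dict.keys_mk]
  -- the three loop bodies as 'acc + weight k'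
  have e1 : (fun (acc : Int) k =>
      if dB.contains k = false then acc + 1
      else if dA.get? k ≠ dB.get? k then acc + 1 else acc)
      = fun acc k => acc + (if dB.contains k = false then 1
                            else if dA.get? k ≠ dB.get? k then 1 else 0) := by
    funext acc k; split_ifs <;> simp
  have e2 : (fun (acc : Int) k =>
      if dA.contains k = false then acc + 1
      else if dA.get? k ≠ dB.get? k then acc + 1 else acc)
      = fun acc k => acc + (if dA.contains k = false then 1
                            else if dA.get? k ≠ dB.get? k then 1 else 0) := by
    funext acc k; split_ifs <;> simp
  have e3 : (fun (acc : Int) k =>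
      if dA.contains k && dB.contains k then
        acc + (if dA.get? k ≠ dB.get? k then 2 else 0)
      else acc + 1)
      = fun acc k => acc + (if dA.contains k && dB.contains k then
                              (if dA.get? k ≠ dB.get? k then 2 else 0) else 1) := by
    funext acc k; split_ifs <;> simp
  rw [e1, e2, e3, PySem.List.foldl_add, PySem.List.foldl_add, PySem.List.foldl_add]
  set fA : String → Int := fun k =>
    if dB.contains k = false then 1 else if dA.get? k ≠ dB.get? k then 1 else 0 with hfA
  set fB : String → Int := fun k =>
    if dA.contains k = false then 1 else if dA.get? k ≠ dB.get? k then 1 else 0 with hfB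
  set g : String → Int := fun k =>
    if dA.contains k && dB.contains k then (if dA.get? k ≠ dB.get? k then 2 else 0) else 1 with hg
  set U : List String := PySem.Set.ofList (dA.keys ++ dB.keys) with hU
  have hUnodup : U.Nodup := PySem.Set.nodup_ofList _
  have hmemU : ∀ x, x ∈ U ↔ (x ∈ dA.keys ∨ x ∈ dB.keys) := by
    intro x; rw [hU, PySem.Set.mem_ofList, List.mem_append]
  have hsubA : ∀ x ∈ dA.keys, x ∈ U := fun x hx => (hmemU x).mpr (Or.inl hx)
  have hsubB : ∀ x ∈ dB.keys, x ∈ U := fun x hx => (hmemU x).mpr (Or.inr hx)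
  have hAnd : dA.keys.Nodup := by rw [hkA]; exact hA
  have hBnd : dB.keys.Nodup := by rw [hkB]; exact hB
  rw [sum_map_indicator_superset dA.keys U fA hAnd hUnodup hsubA,
      sum_map_indicator_superset dB.keys U fB hBnd hUnodup hsubB]
  have hpoint : ∀ k ∈ U,
      ((if k ∈ dA.keys then fA k else 0) + (if k ∈ dB.keys then fB k else 0)) = g k := by
    intro k hk
    have hcA : dA.contains k = decide (k ∈ dA.keys) := PySem.Dict.contains_eq_decide_mem_keys dA k
    have hcB : dB.contains k = decide (k ∈ dB.keys) := PySem.Dict.contains_eq_decide_mem_keys dB k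
    have hor := (hmemU k).mp hk
    by_cases hkA' : k ∈ dA.keys <;> by_cases hkB' : k ∈ dB.keys
    · by_cases hv : dA.get? k ≠ dB.get? k
      · simp [hfA, hfB, hg, hcA, hcB, hkA', hkB', hv]
      · simp [hfA, hfB, hg, hcA, hcB, hkA', hkB']
        split <;> simp
    · simp [hfA, hg, hcA, hcB, hkA', hkB']
    · simp [hfB, hg, hcA, hcB, hkA', hkB']
    · exact absurd hor (by simp [hkA', hkB'])
  have hsum : (U.map (fun k => (if k ∈ dA.keys then fA k else 0) + (if k ∈ dB.keys then fB k else 0))).sum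
      = (U.map g).sum := by rw [List.map_congr_left hpoint]
  rw [PySem.List.sum_map_add_int] at hsum
  omega
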